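-- pv_equiv track=rewrite | github.com/benquick123/code-profiling | code/batch-1/vse-naloge-brez-testov/DN6-M-37.py | prvi_tvit
-- ===== SOURCE A (Python) =====
-- def avtor(tvit):
--     ts = tvit.split(":")
--     return ts[0]
--
-- def besedilo(tvit):
--     tvit = tvit.split(": ", 1)
--     a = tvit[0]
--     b = tvit[1]
--     return b
--
-- def prvi_tvit(tviti):
--     s = {}
--     for tvit in tviti:
--         a = avtor(tvit)
--         b = besedilo(tvit)
--         if a not in s:
--             s[a] = b
--     return s
-- ===== SOURCE B (Python) =====
-- def prvi_tvit(tviti):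
--     tviti = list(tviti)
--     avtorji = dict.fromkeys(t.split(":")[0] for t in tviti)
--     return {a: next(t.split(": ", 1)[1] for t in tviti if t.split(":")[0] == a)
--             for a in avtorji}
-- ===== Notes on version B (the rewrite author's own statement) =====
-- stated objective: alternative
-- what changed: A builds the dict in one pass with an 'a not in s' membership guard; B first dedups the author list once with dict.fromkeys and then, for each distinct author, scans the tweets for that author's first tweet and takes its text (two-phase dict comprehension, no guarded incremental insert).
import Mathlib
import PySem

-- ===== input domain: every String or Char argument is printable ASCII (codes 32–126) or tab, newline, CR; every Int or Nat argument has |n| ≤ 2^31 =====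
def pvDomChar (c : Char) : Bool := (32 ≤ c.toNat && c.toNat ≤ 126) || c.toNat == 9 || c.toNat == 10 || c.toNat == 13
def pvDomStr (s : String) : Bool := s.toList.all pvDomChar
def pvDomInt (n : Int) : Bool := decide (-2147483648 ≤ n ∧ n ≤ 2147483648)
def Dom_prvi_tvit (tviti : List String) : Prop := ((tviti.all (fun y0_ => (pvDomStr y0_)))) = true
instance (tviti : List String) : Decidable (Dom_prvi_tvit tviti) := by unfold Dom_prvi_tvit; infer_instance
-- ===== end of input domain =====

-- B replaces A's incremental dict with a membership guard by a two-phase plan: dedup the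
-- author list once (dict.fromkeys), then look up each author's first tweet's text directly.

-- ===== PORT A =====
-- avtor(tvit): tvit.split(":")[0].  split with a nonempty separator never raises and always
-- returns a nonempty list, so the [0] index is total (the defaults here are never used).
def pyAvtor (tvit : String) : String :=
  ((PySem.Str.split? tvit ":").getD []).headD ""

-- besedilo(tvit): tvit.split(": ", 1)[1].  The [1] index raises IndexError exactly when
-- ": " does not occur in tvit; Pre_ excludes those inputs, so the getD default is never hit.
def pyBesedilo (tvit : String) : String :=
  (PySem.List.pyGet? ((PySem.Str.splitMax? tvit ": " 1).getD []) 1).getD ""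

def prvi_tvit (tviti : List String) : List (String × String) :=
  (tviti.foldl (fun s tvit =>
      let a := pyAvtor tvit
      let b := pyBesedilo tvit
      if s.contains a then s else s.insert a b)
    PySem.Dict.empty).items

-- ===== PORT B =====
-- next(t.split(": ", 1)[1] for t in tviti if t.split(":")[0] == a); the StopIteration arm is
-- unreachable in B because a is always drawn from the authors of tviti.
def prviTekst (tviti : List String) (a : String) : String :=
  match tviti.find? (fun t => ((PySem.Str.split? t ":").getD []).headD "" == a) with
  | some t => (PySem.List.pyGet? ((PySem.Str.splitMax? t ": " 1).getD []) 1).getD ""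
  | none => ""

def prvi_tvit_alt (tviti : List String) : List (String × String) :=
  let avtorji := PySem.List.dedup (tviti.map (fun t => ((PySem.Str.split? t ":").getD []).headD ""))
  (avtorji.foldl (fun d a => d.insert a (prviTekst tviti a)) PySem.Dict.empty).items

-- ===== PRECONDITION & SPEC =====
-- A raises IndexError (in besedilo) on any tweet not containing ": "; exactly those inputs are excluded.
def Pre_prvi_tvit (tviti : List String) : Prop := ∀ t ∈ tviti, PySem.Str.isIn ": " t = true
instance (tviti : List String) : Decidable (Pre_prvi_tvit tviti) := by unfold Pre_prvi_tvit; infer_instance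
def pvWitness_prvi_tvit : List String := ["ana: zdravo", "bine: hej", "ana: se spet"]

def Spec_prvi_tvit (tviti : List String) (out : List (String × String)) : Prop := out = prvi_tvit_alt tviti
instance (tviti : List String) (out : List (String × String)) : Decidable (Spec_prvi_tvit tviti out) := by unfold Spec_prvi_tvit; infer_instance

-- ===== CLAIM (what is proved, stated in full; the proofs are below) =====
def Claim_equal_prvi_tvit : Prop := ∀ (tviti : List String), Dom_prvi_tvit tviti → Pre_prvi_tvit tviti → Spec_prvi_tvit tviti (prvi_tvit tviti)

-- ===== LEMMAS AND PROOFS =====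

-- appending a tweet does not change the first text of an author already present
lemma prviTekst_append_of_mem {xs : List String} {x a : String}
    (h : a ∈ xs.map pyAvtor) : prviTekst (xs ++ [x]) a = prviTekst xs a := by
  obtain ⟨t, ht, hta⟩ := List.mem_map.mp h
  have hs : (xs.find? (fun t => ((PySem.Str.split? t ":").getD []).headD "" == a)).isSome :=
    List.find?_isSome.mpr ⟨t, ht, by show (pyAvtor t == a) = true; simp [hta]⟩
  unfold prviTekst
  rw [List.find?_append]
  cases e : xs.find? (fun t => ((PySem.Str.split? t ":").getD []).headD "" == a) with
  | none => rw [e] at hs; simp at hs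
  | some t' => simp

-- the first text of a brand-new author is the text of the appended tweet itself
lemma prviTekst_append_self {xs : List String} {x : String}
    (h : pyAvtor x ∉ xs.map pyAvtor) :
    prviTekst (xs ++ [x]) (pyAvtor x) = pyBesedilo x := by
  have hn : xs.find? (fun t => ((PySem.Str.split? t ":").getD []).headD "" == pyAvtor x) = none := by
    rw [List.find?_eq_none]
    intro t ht hbe
    exact h (List.mem_map.mpr ⟨t, ht, by simpa [pyAvtor] using hbe⟩)
  unfold prviTekst
  rw [List.find?_append, hn]
  simp [pyAvtor, pyBesedilo]

-- the loop of A, characterised: its items are exactly B's author list paired with first texts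
lemma foldA_items (xs : List String) :
    (xs.foldl (fun s tvit =>
        if s.contains (pyAvtor tvit) then s else s.insert (pyAvtor tvit) (pyBesedilo tvit))
      PySem.Dict.empty).items
    = (PySem.Set.ofList (xs.map pyAvtor)).map (fun a => (a, prviTekst xs a)) := by
  induction xs using List.reverseRecOn with
  | nil => rfl
  | append_singleton xs x ih =>
    rw [List.foldl_append]
    have hkeys : (xs.foldl (fun s tvit =>
        if s.contains (pyAvtor tvit) then s else s.insert (pyAvtor tvit) (pyBesedilo tvit))
        PySem.Dict.empty).keys = PySem.Set.ofList (xs.map pyAvtor) := by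
      simp [PySem.Dict.keys, ih, List.map_map, Function.comp_def]
    have hcont : (xs.foldl (fun s tvit =>
        if s.contains (pyAvtor tvit) then s else s.insert (pyAvtor tvit) (pyBesedilo tvit))
        PySem.Dict.empty).contains (pyAvtor x) = decide (pyAvtor x ∈ xs.map pyAvtor) := by
      rw [PySem.Dict.contains_eq_decide_mem_keys, hkeys]
      simp [PySem.Set.mem_ofList]
    simp only [List.map_append, List.map_cons, List.map_nil]
    rw [PySem.Set.ofList_append_singleton]
    by_cases hm : pyAvtor x ∈ xs.map pyAvtor
    · rw [PySem.Set.add_of_mem ((PySem.Set.mem_ofList _ _).mpr hm)]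
      simp only [List.foldl_cons, List.foldl_nil, hcont, hm, decide_true, if_true, ih]
      exact (List.map_congr_left fun a ha =>
        by rw [prviTekst_append_of_mem ((PySem.Set.mem_ofList _ _).mp ha)]).symm
    · rw [PySem.Set.add_of_not_mem (fun hc => hm ((PySem.Set.mem_ofList _ _).mp hc))]
      simp only [List.foldl_cons, List.foldl_nil, hcont, hm, decide_false, Bool.false_eq_true, if_false]
      rw [PySem.Dict.items_insert_of_not_contains _ _ (by rw [hcont]; simp [hm]), ih,
        List.map_append]
      congr 1
      · exact List.map_congr_left fun a ha =>
          by rw [prviTekst_append_of_mem ((PySem.Set.mem_ofList _ _).mp ha)]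
      · simp [prviTekst_append_self hm]

-- ===== VERDICT (by name: the statement is the Claim_ definition above) =====
theorem prvi_tvit_spec : Claim_equal_prvi_tvit := by
  intro tviti _ _
  show prvi_tvit tviti = prvi_tvit_alt tviti
  have hB : prvi_tvit_alt tviti
      = (PySem.Set.ofList (tviti.map pyAvtor)).map (fun a => (a, prviTekst tviti a)) := by
    show ((PySem.List.dedup (tviti.map pyAvtor)).foldl
        (fun d a => d.insert a (prviTekst tviti a)) PySem.Dict.empty).items = _
    rw [PySem.List.dedup_eq_ofList,
      PySem.Dict.items_foldl_insert_fresh (PySem.Set.ofList (tviti.map pyAvtor))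
        (fun a => a) (fun a => prviTekst tviti a) PySem.Dict.empty
        (fun a _ => PySem.Dict.contains_empty a)
        (by simp only [List.map_id']; exact PySem.Set.nodup_ofList (tviti.map pyAvtor))]
    simp [PySem.Dict.empty]
  rw [hB]
  exact foldA_items tviti
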